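-- pv_equiv track=rewrite | github.com/YannThorimbert/Thorpy | thorpy/documentation/examples/generatehtml.py | get_line_content
-- ===== SOURCE A (Python) =====
-- def get_line_content(line):
--     char = ""
-- ##    if "'" in line:
-- ##        char = "'"
-- ##        lines = line.split("'")
--     if '"' in line:
--         char = '"'
--         lines = line.split('"')
--     else:
--         return [], [line]
--     strs = [char+s+char for s in lines[1::2]]
--     nostrs = lines[0::2]
--     return strs, nostrs
-- ===== SOURCE B (Python) =====
-- def get_line_content(line):
--     strs, nostrs = [], []
--     buf = []
--     in_string = False
--     for ch in line:
--         if ch == '"':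
--             if in_string:
--                 strs.append('"' + ''.join(buf) + '"')
--             else:
--                 nostrs.append(''.join(buf))
--             in_string = not in_string
--             buf = []
--         else:
--             buf.append(ch)
--     if in_string:
--         strs.append('"' + ''.join(buf) + '"')
--     else:
--         nostrs.append(''.join(buf))
--     return strs, nostrs
-- ===== Notes on version B (the rewrite author's own statement) =====
-- stated objective: alternative
-- what changed: Replaces str.split plus two stride-2 slices with a single character-by-character scan that keeps an in_string flag and a segment buffer, dispatching each finished segment to strs or nostrs as it is closed.
import Mathlib
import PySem

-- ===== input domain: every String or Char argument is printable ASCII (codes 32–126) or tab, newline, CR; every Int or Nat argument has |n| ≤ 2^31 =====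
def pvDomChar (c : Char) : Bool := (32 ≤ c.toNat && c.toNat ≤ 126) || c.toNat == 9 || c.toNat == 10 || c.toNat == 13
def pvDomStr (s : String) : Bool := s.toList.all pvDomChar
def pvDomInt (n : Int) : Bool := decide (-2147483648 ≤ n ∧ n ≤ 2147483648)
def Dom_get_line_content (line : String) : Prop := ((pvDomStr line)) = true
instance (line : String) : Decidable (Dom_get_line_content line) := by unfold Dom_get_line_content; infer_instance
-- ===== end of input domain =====

-- B replaces split('"') + stride-2 slicing by a single char-by-char scan with an in-string flag (alternative decomposition, same cost).


-- ===== PORT A =====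
def get_line_content (line : String) : List String × List String :=
  if PySem.Str.isIn "\"" line = true then
    let lines := PySem.Chars.splitOn line.toList ['"']
    let strs := ((PySem.List.slice? lines (some 1) none 2).getD []).map
      (fun s => String.ofList ('"' :: (s ++ ['"'])))
    let nostrs := ((PySem.List.slice? lines (some 0) none 2).getD []).map String.ofList
    (strs, nostrs)
  else ([], [line])

-- ===== PORT B =====
-- one loop step: close the current segment on '"', otherwise extend the buffer
def glcStep (st : List String × List String × List Char × Bool) (c : Char) :
    List String × List String × List Char × Bool :=
  match st with
  | (strs, nostrs, buf, inStr) =>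
    if c = '"' then
      if inStr then (strs ++ [String.ofList ('"' :: (buf ++ ['"']))], nostrs, [], false)
      else (strs, nostrs ++ [String.ofList buf], [], true)
    else (strs, nostrs, buf ++ [c], inStr)

-- final flush of the buffer after the loop
def glcFlush (st : List String × List String × List Char × Bool) : List String × List String :=
  match st with
  | (strs, nostrs, buf, inStr) =>
    if inStr then (strs ++ [String.ofList ('"' :: (buf ++ ['"']))], nostrs)
    else (strs, nostrs ++ [String.ofList buf])

def get_line_content_alt (line : String) : List String × List String :=
  glcFlush (line.toList.foldl glcStep ([], [], [], false))

-- ===== PRECONDITION & SPEC =====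
def Spec_get_line_content (line : String) (out : List String × List String) : Prop := out = get_line_content_alt line
instance (line : String) (out : List String × List String) : Decidable (Spec_get_line_content line out) := by unfold Spec_get_line_content; infer_instance

-- ===== CLAIM (what is proved, stated in full; the proofs are below) =====
def Claim_equal_get_line_content : Prop := ∀ (line : String), Dom_get_line_content line → Spec_get_line_content line (get_line_content line)

-- ===== LEMMAS AND PROOFS =====

/-- The list of segments of `l` between occurrences of `'"'` (what `l.split('"')` returns). -/
def pieces : List Char → List (List Char)
  | [] => [[]]
  | c :: cs => if c = '"' then [] :: pieces cs else (pieces cs).modifyHead (c :: ·)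

/-- `alt true` keeps elements at even positions, `alt false` those at odd positions. -/
def alt {α : Type} : Bool → List α → List α
  | _, [] => []
  | true, x :: xs => x :: alt false xs
  | false, _ :: xs => alt true xs

theorem pieces_ne_nil (l : List Char) : pieces l ≠ [] := by
  induction l with
  | nil => simp [pieces]
  | cons c cs ih =>
    simp only [pieces]
    split_ifs
    · simp
    · cases h : pieces cs with
      | nil => exact absurd h ih
      | cons p ps => simp [List.modifyHead]

theorem splitOn_go_eq (fuel : Nat) : ∀ (l cur : List Char) (acc : List (List Char)),
    l.length < fuel →
    PySem.Chars.splitOn.go ['"'] fuel l cur acc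
      = acc.reverse ++ (pieces l).modifyHead (cur.reverse ++ ·) := by
  induction fuel with
  | zero => intro l cur acc h; omega
  | succ n ih =>
    intro l cur acc h
    cases l with
    | nil => simp [PySem.Chars.splitOn.go, pieces]
    | cons c rest =>
      simp only [PySem.Chars.splitOn.go]
      by_cases hc : c = '"'
      · subst hc
        rw [if_pos (by simp [List.isPrefixOf])]
        rw [ih _ _ _ (by simpa using Nat.lt_of_succ_lt_succ h)]
        simp [pieces]
        cases hp : pieces rest <;> simp [List.modifyHead]
      · rw [if_neg (by simp [List.isPrefixOf]; exact fun h => hc h.symm)]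
        rw [ih _ _ _ (by simpa using Nat.lt_of_succ_lt_succ h)]
        rw [show pieces (c :: rest) = (pieces rest).modifyHead (c :: ·) from by simp [pieces, hc]]
        rw [List.modifyHead_modifyHead]
        congr 2
        funext x
        simp

theorem splitOn_eq_pieces (l : List Char) : PySem.Chars.splitOn l ['"'] = pieces l := by
  show PySem.Chars.splitOn.go ['"'] (l.length + 1) l [] [] = pieces l
  rw [splitOn_go_eq (l.length + 1) l [] [] (by omega)]
  cases h : pieces l with
  | nil => exact absurd h (pieces_ne_nil l)
  | cons p ps => simp [List.modifyHead]

theorem fm_alt {α : Type} (xs : List α) : ∀ (b : Bool),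
    List.filterMap (fun (k : Nat) => xs[((if b then (0:Int) else 1) + 2 * (k : Int)).toNat]?)
      (List.range ((xs.length + (if b then 1 else 0)) / 2)) = alt b xs := by
  induction xs with
  | nil => intro b; cases b <;> simp [alt]
  | cons x xs ih =>
    intro b
    cases b with
    | true =>
      rw [show (((x :: xs).length + if (true:Bool) then 1 else 0) / 2)
            = ((xs.length + (if (false:Bool) then 1 else 0)) / 2) + 1 from by simp; omega]
      rw [List.range_succ_eq_map, List.filterMap_cons, List.filterMap_map]
      rw [show (fun (k : Nat) => (x :: xs)[((if (true:Bool) then (0:Int) else 1) + 2 * (k : Int)).toNat]?) ∘ Nat.succ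
            = (fun (k : Nat) => xs[((if (false:Bool) then (0:Int) else 1) + 2 * (k : Int)).toNat]?) from by
        funext k
        have hi : ((if (true:Bool) then (0:Int) else 1) + 2 * ((Nat.succ k : Nat) : Int)).toNat
            = ((if (false:Bool) then (0:Int) else 1) + 2 * ((k : Nat) : Int)).toNat + 1 := by
          simp only [if_true]; push_cast; omega
        rw [Function.comp_apply, hi, List.getElem?_cons_succ]]
      rw [ih false]
      simp [alt]
    | false =>
      rw [show (((x :: xs).length + if (false:Bool) then 1 else 0) / 2)
            = ((xs.length + (if (true:Bool) then 1 else 0)) / 2) from by simp]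
      rw [show (fun (k : Nat) => (x :: xs)[((if (false:Bool) then (0:Int) else 1) + 2 * (k : Int)).toNat]?)
            = (fun (k : Nat) => xs[((if (true:Bool) then (0:Int) else 1) + 2 * (k : Int)).toNat]?) from by
        funext k
        have hi : ((if (false:Bool) then (0:Int) else 1) + 2 * ((k : Nat) : Int)).toNat
            = ((if (true:Bool) then (0:Int) else 1) + 2 * ((k : Nat) : Int)).toNat + 1 := by
          simp only [if_true]; push_cast; omega
        rw [hi, List.getElem?_cons_succ]]
      rw [ih true]
      simp [alt]

theorem slice?_even {α : Type} (xs : List α) :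
    (PySem.List.slice? xs (some 0) none 2).getD [] = alt true xs := by
  have h := fm_alt xs true
  unfold PySem.List.slice? PySem.List.sliceIndices
  norm_num
  have hc : (if 0 < xs.length then (((xs.length:Int) + 2 - 1) / 2).toNat else 0) = (xs.length + 1)/2 := by
    split_ifs with h0 <;> omega
  rw [hc]
  norm_num at h
  exact h

theorem slice?_odd {α : Type} (xs : List α) :
    (PySem.List.slice? xs (some 1) none 2).getD [] = alt false xs := by
  cases xs with
  | nil => rfl
  | cons y ys =>
    have h := fm_alt (y :: ys) false
    unfold PySem.List.slice? PySem.List.sliceIndices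
    norm_num
    have hc : (if 0 < ys.length then (((ys.length : Int) + 2 - 1) / 2).toNat else 0)
        = ((y :: ys).length + 0) / 2 := by
      split_ifs with h0 <;> simp <;> omega
    rw [hc]
    norm_num at h ⊢
    exact h

theorem pieces_no_quote (l : List Char) (h : '"' ∉ l) : pieces l = [l] := by
  induction l with
  | nil => simp [pieces]
  | cons c cs ih =>
    simp only [List.mem_cons, not_or] at h
    simp [pieces, Ne.symm h.1, ih h.2, List.modifyHead]

theorem foldl_glc (l : List Char) : ∀ (strs nostrs : List String) (buf : List Char) (b : Bool),
    glcFlush (l.foldl glcStep (strs, nostrs, buf, b))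
      = (let P := (pieces l).modifyHead (buf ++ ·)
         if b then (strs ++ (alt true P).map (fun s => String.ofList ('"' :: (s ++ ['"']))), nostrs ++ (alt false P).map String.ofList)
         else (strs ++ (alt false P).map (fun s => String.ofList ('"' :: (s ++ ['"']))), nostrs ++ (alt true P).map String.ofList)) := by
  induction l with
  | nil =>
    intro strs nostrs buf b
    cases b <;> simp [glcFlush, pieces, List.modifyHead, alt]
  | cons c cs ih =>
    intro strs nostrs buf b
    simp only [List.foldl_cons]
    by_cases hc : c = '"'
    · subst hc
      cases b with
      | false =>
        rw [show glcStep (strs, nostrs, buf, false) '"' = (strs, nostrs ++ [String.ofList buf], [], true) from by simp [glcStep]]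
        rw [ih]
        simp only [pieces, List.modifyHead]
        cases hp : pieces cs <;> simp [alt]
      | true =>
        rw [show glcStep (strs, nostrs, buf, true) '"' = (strs ++ [String.ofList ('"' :: (buf ++ ['"']))], nostrs, [], false) from by simp [glcStep]]
        rw [ih]
        simp only [pieces, List.modifyHead]
        cases hp : pieces cs <;> simp [alt]
    · rw [show glcStep (strs, nostrs, buf, b) c = (strs, nostrs, buf ++ [c], b) from by simp [glcStep, hc]]
      rw [ih]
      rw [show pieces (c :: cs) = (pieces cs).modifyHead (c :: ·) from by simp [pieces, hc]]
      rw [List.modifyHead_modifyHead]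
      have : ((buf ++ ·) ∘ (c :: ·)) = ((buf ++ [c]) ++ ·) := by funext x; simp
      rw [this]

-- ===== VERDICT (by name: the statement is the Claim_ definition above) =====
theorem get_line_content_spec : Claim_equal_get_line_content := by
  intro line _
  show get_line_content line = get_line_content_alt line
  have hB : get_line_content_alt line
      = ((alt false (pieces line.toList)).map (fun s => String.ofList ('"' :: (s ++ ['"']))),
         (alt true (pieces line.toList)).map String.ofList) := by
    show glcFlush (line.toList.foldl glcStep ([], [], [], false)) = _
    rw [foldl_glc]
    cases h : pieces line.toList with
    | nil => exact absurd h (pieces_ne_nil _)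
    | cons p ps => simp [List.modifyHead]
  rw [hB]
  unfold get_line_content
  by_cases hin : PySem.Str.isIn "\"" line = true
  · rw [if_pos hin]
    simp only [splitOn_eq_pieces, slice?_even, slice?_odd]
  · rw [if_neg hin]
    have hmem : '"' ∉ line.toList := by
      rw [Bool.not_eq_true] at hin
      have := PySem.Str.isIn_iff_infix (sub := "\"") (s := line)
      rw [← List.singleton_infix_iff]
      intro hinf
      rw [hin] at this
      simp at this
      exact this hinf
    rw [pieces_no_quote _ hmem]
    simp [alt]
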